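-- pv_equiv track=rewrite | github.com/coreyt429/remote_test | tasks.py | _ordered_state_names
-- ===== SOURCE A (Python) =====
-- from typing import Dict, List, Any, Tuple, Optional
--
-- def _ordered_state_names(records: Dict[str, List[str]]) -> List[str]:
--     """
--     Deterministic priority if multiple states could match:
--       numeric states DESC (e.g., 13057, 13056), then 'original', then other labels alpha.
--     """
--     numeric, other = [], []
--     for k in records.keys():
--         try:
--             numeric.append((int(k), k))
--         except ValueError:
--             other.append(k)
--     ordered = [name for _, name in sorted(numeric, key=lambda x: x[0], reverse=True)]
--     if "original" in other:
--         other.remove("original")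
--         ordered.append("original")
--     ordered.extend(sorted(other))
--     return ordered
-- ===== SOURCE B (Python) =====
-- def _ordered_state_names(records):
--     def sort_key(k):
--         try:
--             return (0, -int(k), "")
--         except ValueError:
--             pass
--         return (1, 0, "") if k == "original" else (2, 0, k)
--     return sorted(records, key=sort_key)
-- ===== Notes on version B (the rewrite author's own statement) =====
-- stated objective: simpler
-- what changed: A partitions keys into numeric and other lists, sorts the numeric pairs with reverse=True, splices the original label out of the second list and concatenates three pieces; B is a single stable sorted() call whose key function maps each key to a 3-tuple - group number, negated int value for numeric keys, the label itself for the alphabetical group - so descending numeric order comes from negation instead of reverse=True.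
import Mathlib
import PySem

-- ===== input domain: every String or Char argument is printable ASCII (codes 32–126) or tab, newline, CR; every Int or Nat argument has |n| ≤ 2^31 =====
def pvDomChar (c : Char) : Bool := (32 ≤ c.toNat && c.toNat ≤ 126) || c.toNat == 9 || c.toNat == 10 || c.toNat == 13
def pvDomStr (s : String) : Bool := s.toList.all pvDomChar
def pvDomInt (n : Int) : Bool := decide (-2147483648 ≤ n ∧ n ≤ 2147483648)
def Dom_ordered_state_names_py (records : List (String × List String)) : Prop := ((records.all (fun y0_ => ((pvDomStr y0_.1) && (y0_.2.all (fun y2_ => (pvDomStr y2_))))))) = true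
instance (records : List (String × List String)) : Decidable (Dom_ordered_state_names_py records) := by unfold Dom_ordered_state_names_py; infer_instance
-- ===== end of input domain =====

-- B replaces A's partition / two sorts / concatenate by ONE stable keyed sort on a 3-tuple key
-- (group number, negated numeric value, label); objective: simpler (a single sorted() call).

-- ===== PORT A =====
def ordered_state_names_py (records : List (String × List String)) : List String :=
  let keys := (PySem.Dict.ofList records).keys
  let acc := keys.foldl (fun (acc : List (Int × String) × List String) k =>
      match PySem.Int.ofStr? k with
      | some n => (acc.1 ++ [(n, k)], acc.2)      -- numeric.append((int(k), k))
      | none   => (acc.1, acc.2 ++ [k]))          -- except ValueError: other.append(k)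
    ([], [])
  let numeric := acc.1
  let other := acc.2
  let ordered := (PySem.List.sorted numeric (fun x => x.1) true).map (fun x => x.2)
  if "original" ∈ other then
    -- other.remove("original") cannot raise here (guarded by the membership test): .getD only makes it total
    let other' := (PySem.List.remove? other "original").getD other
    (ordered ++ ["original"]) ++ PySem.List.sorted other' (fun x => x)
  else
    ordered ++ PySem.List.sorted other (fun x => x)

-- ===== PORT B =====
-- sort_key(k): numeric -> (0, -int(k), ""), "original" -> (1, 0, ""), other -> (2, 0, k)
def pvSortKey3 (k : String) : Int × Int × String :=
  match PySem.Int.ofStr? k with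
  | some n => (0, -n, "")
  | none   => if k = "original" then (1, 0, "") else (2, 0, k)

-- Python's lexicographic '<' on the 3-tuples, written out component by component
def pvTupleLt (a b : Int × Int × String) : Bool :=
  decide (a.1 < b.1 ∨ (a.1 = b.1 ∧ (a.2.1 < b.2.1 ∨ (a.2.1 = b.2.1 ∧ a.2.2 < b.2.2))))

-- sorted(records, key=sort_key): PySem.List.sorted IS this foldl/insertBy stable insertion sort
-- (PySem.List.sorted_eq_foldl_insertBy, rfl); it is written in that form here with the tuple
-- comparison spelled out, because the Lex tuple-order instance does not evaluate compiled
def ordered_state_names_py_alt (records : List (String × List String)) : List String :=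
  (PySem.Dict.ofList records).keys.foldl
    (fun acc k => PySem.List.insertBy (fun a b => pvTupleLt (pvSortKey3 a) (pvSortKey3 b)) k acc) []

-- ===== PRECONDITION & SPEC =====
def Spec_ordered_state_names_py (records : List (String × List String)) (out : List String) : Prop := out = ordered_state_names_py_alt records
instance (records : List (String × List String)) (out : List String) : Decidable (Spec_ordered_state_names_py records out) := by unfold Spec_ordered_state_names_py; infer_instance

-- ===== CLAIM (what is proved, stated in full; the proofs are below) =====
def Claim_equal_ordered_state_names_py : Prop := ∀ (records : List (String × List String)), Dom_ordered_state_names_py records → Spec_ordered_state_names_py records (ordered_state_names_py records)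

-- ===== LEMMAS AND PROOFS =====

-- proof-side abbreviations for A's partition
def pvIsNum (k : String) : Bool := (PySem.Int.ofStr? k).isSome

-- proof-side view of B's tuple key as a lexicographically ordered value
def pvSortKey (k : String) : Lex (Int × Lex (Int × String)) :=
  toLex ((pvSortKey3 k).1, toLex ((pvSortKey3 k).2.1, (pvSortKey3 k).2.2))

lemma tupleLt_eq_keyLt (a b : String) :
    pvTupleLt (pvSortKey3 a) (pvSortKey3 b) = decide (pvSortKey a < pvSortKey b) := by
  rw [pvTupleLt, decide_eq_decide, pvSortKey, pvSortKey]
  rw [Prod.Lex.lt_iff]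
  simp only [ofLex_toLex]
  rw [Prod.Lex.lt_iff]
  simp only [ofLex_toLex]

lemma alt_eq_sorted (records : List (String × List String)) :
    ordered_state_names_py_alt records
      = PySem.List.sorted (PySem.Dict.ofList records).keys pvSortKey := by
  rw [ordered_state_names_py_alt, PySem.List.sorted_eq_foldl_insertBy]
  have h : (fun (a b : String) => pvTupleLt (pvSortKey3 a) (pvSortKey3 b))
      = fun a b => decide (pvSortKey a < pvSortKey b) :=
    funext fun a => funext fun b => tupleLt_eq_keyLt a b
  rw [h]
def pvIV (k : String) : Int := (PySem.Int.ofStr? k).getD 0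
def pvF (k : String) : Int × String := (pvIV k, k)

lemma insertBy_append_of_all {α : Type} (b : α → α → Bool) (x : α) (l1 l2 : List α)
    (h : ∀ y ∈ l2, b x y = true) :
    PySem.List.insertBy b x (l1 ++ l2) = PySem.List.insertBy b x l1 ++ l2 := by
  induction l1 with
  | nil =>
    cases l2 with
    | nil => rfl
    | cons y t =>
      simp only [List.nil_append, PySem.List.insertBy]
      rw [h y (by simp)]
      rfl
  | cons a l1 ih =>
    show PySem.List.insertBy b x (a :: (l1 ++ l2)) = _
    by_cases hb : b x a
    · simp [PySem.List.insertBy, hb]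
    · simp only [PySem.List.insertBy, hb]
      simp [ih]

lemma insertBy_append_of_none {α : Type} (b : α → α → Bool) (x : α) (l1 l2 : List α)
    (h : ∀ y ∈ l1, b x y = false) :
    PySem.List.insertBy b x (l1 ++ l2) = l1 ++ PySem.List.insertBy b x l2 := by
  induction l1 with
  | nil => rfl
  | cons a l1 ih =>
    show PySem.List.insertBy b x (a :: (l1 ++ l2)) = _
    have ha : b x a = false := h a (by simp)
    simp only [PySem.List.insertBy, ha]
    simp only [Bool.false_eq_true, if_false, List.cons_append, List.cons.injEq, true_and]
    exact ih (fun y hy => h y (by simp [hy]))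

lemma insertBy_congr {α : Type} (b1 b2 : α → α → Bool) (x : α) (l : List α)
    (h : ∀ y ∈ l, b1 x y = b2 x y) :
    PySem.List.insertBy b1 x l = PySem.List.insertBy b2 x l := by
  induction l with
  | nil => rfl
  | cons a l ih =>
    have ha : b1 x a = b2 x a := h a (by simp)
    simp only [PySem.List.insertBy, ha]
    by_cases hb : b2 x a
    · simp [hb]
    · simp only [hb, Bool.false_eq_true, if_false]
      rw [ih (fun y hy => h y (by simp [hy]))]

lemma foldl_insertBy_congr {α : Type} (b1 b2 : α → α → Bool) (S : List α)
    (h : ∀ a c, a ∈ S → c ∈ S → b1 a c = b2 a c) :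
    ∀ (xs acc : List α), (∀ y ∈ xs, y ∈ S) → (∀ y ∈ acc, y ∈ S) →
    xs.foldl (fun acc x => PySem.List.insertBy b1 x acc) acc
      = xs.foldl (fun acc x => PySem.List.insertBy b2 x acc) acc := by
  intro xs
  induction xs with
  | nil => intro acc _ _; rfl
  | cons x t ih =>
    intro acc hxs hacc
    have hx : x ∈ S := hxs x (by simp)
    simp only [List.foldl_cons]
    rw [insertBy_congr b1 b2 x acc (fun y hy => h x y hx (hacc y hy))]
    exact ih _ (fun y hy => hxs y (by simp [hy]))
      (fun y hy => by
        rcases (PySem.List.mem_insertBy b2 x y acc).1 hy with h1 | h1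
        · exact h1 ▸ hx
        · exact hacc y h1)

lemma insertBy_map {α β : Type} (f : α → β) (b1 : β → β → Bool) (b2 : α → α → Bool)
    (h : ∀ a c, b1 (f a) (f c) = b2 a c) (x : α) (l : List α) :
    PySem.List.insertBy b1 (f x) (l.map f) = (PySem.List.insertBy b2 x l).map f := by
  induction l with
  | nil => rfl
  | cons a l ih =>
    simp only [List.map_cons, PySem.List.insertBy, h x a]
    by_cases hb : b2 x a
    · simp [hb]
    · simp only [hb, Bool.false_eq_true, if_false]
      simp [ih]

lemma foldl_insertBy_map {α β : Type} (f : α → β) (b1 : β → β → Bool) (b2 : α → α → Bool)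
    (h : ∀ a c, b1 (f a) (f c) = b2 a c) :
    ∀ (xs acc : List α),
    (xs.map f).foldl (fun acc x => PySem.List.insertBy b1 x acc) (acc.map f)
      = (xs.foldl (fun acc x => PySem.List.insertBy b2 x acc) acc).map f := by
  intro xs
  induction xs with
  | nil => intro acc; rfl
  | cons x t ih =>
    intro acc
    simp only [List.map_cons, List.foldl_cons]
    rw [insertBy_map f b1 b2 h x acc]
    exact ih _

-- stable sort splits into the strictly-smaller group followed by the rest
lemma sorted_split {α κ : Type} [LinearOrder κ] (p : α → Bool) (key : α → κ) (xs : List α)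
    (h : ∀ a ∈ xs, ∀ c ∈ xs, p a = true → p c = false → key a < key c) :
    PySem.List.sorted xs key
      = PySem.List.sorted (xs.filter p) key ++ PySem.List.sorted (xs.filter (fun x => !p x)) key := by
  induction xs using List.reverseRecOn with
  | nil => rfl
  | append_singleton xs x ih =>
    have hsort : ∀ (l : List α), PySem.List.sorted (l ++ [x]) key
        = PySem.List.insertBy (fun a b => decide (key a < key b)) x (PySem.List.sorted l key) := by
      intro l
      rw [PySem.List.sorted_eq_foldl_insertBy, PySem.List.sorted_eq_foldl_insertBy,
        List.foldl_append]
      rfl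
    have ih' := ih (fun a ha c hc => h a (by simp [ha]) c (by simp [hc]))
    rw [hsort, ih', List.filter_append, List.filter_append]
    by_cases hp : p x
    · have hall : ∀ y ∈ PySem.List.sorted (xs.filter (fun x => !p x)) key,
          decide (key x < key y) = true := by
        intro y hy
        have hy' := (PySem.List.mem_sorted _ _ _ _).1 hy
        have hpy : ¬ p y := by
          have := List.of_mem_filter hy'
          simpa using this
        simp only [decide_eq_true_eq]
        exact h x (by simp) y (by simp [List.mem_of_mem_filter hy']) hp (by simpa using hpy)
      rw [insertBy_append_of_all _ _ _ _ hall]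
      simp [hp, hsort, List.filter_cons]
    · have hnone : ∀ y ∈ PySem.List.sorted (xs.filter p) key,
          decide (key x < key y) = false := by
        intro y hy
        have hy' := (PySem.List.mem_sorted _ _ _ _).1 hy
        have hpy : p y := List.of_mem_filter hy'
        have : key y < key x :=
          h y (by simp [List.mem_of_mem_filter hy']) x (by simp) hpy (by simpa using hp)
        simp [not_lt_of_gt this]
      rw [insertBy_append_of_none _ _ _ _ hnone]
      simp [hp, hsort, List.filter_cons]

-- A's partition loop computes the two filters
lemma partition_eq (keys : List String) : ∀ (accN : List (Int × String)) (accO : List String),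
    keys.foldl (fun (acc : List (Int × String) × List String) k =>
      match PySem.Int.ofStr? k with
      | some n => (acc.1 ++ [(n, k)], acc.2)
      | none   => (acc.1, acc.2 ++ [k])) (accN, accO)
      = (accN ++ (keys.filter pvIsNum).map pvF, accO ++ keys.filter (fun k => !pvIsNum k)) := by
  induction keys with
  | nil => intro accN accO; simp
  | cons k t ih =>
    intro accN accO
    simp only [List.foldl_cons]
    cases hk : PySem.Int.ofStr? k with
    | some n =>
      have h1 : pvIsNum k = true := by simp [pvIsNum, hk]
      have h2 : pvF k = (n, k) := by simp [pvF, pvIV, hk]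
      simp [hk, ih, List.filter_cons, h1, h2]
    | none =>
      have h1 : pvIsNum k = false := by simp [pvIsNum, hk]
      simp [hk, ih, List.filter_cons, h1]

-- group 0: A's reverse sort of (int(k), k) pairs projected to names = B's stable sort under pvSortKey
lemma grp0_eq (l : List String) (hl : ∀ k ∈ l, pvIsNum k = true) :
    (PySem.List.sorted (l.map pvF) (fun x => x.1) true).map (fun x => x.2)
      = PySem.List.sorted l pvSortKey := by
  rw [PySem.List.sorted_rev_eq_foldl_insertBy, PySem.List.sorted_eq_foldl_insertBy]
  have hmap := foldl_insertBy_map pvF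
      (fun a b => decide (b.1 < a.1)) (fun a c => decide (pvIV c < pvIV a))
      (by intro a c; rfl) l []
  simp only [List.map_nil] at hmap
  rw [hmap, List.map_map]
  have hid : ∀ (m : List String), m.map ((fun (x : Int × String) => x.2) ∘ pvF) = m := by
    intro m
    have h : ((fun (x : Int × String) => x.2) ∘ pvF) = id := funext (fun _ => rfl)
    rw [h, List.map_id]
  rw [hid]
  refine (foldl_insertBy_congr _ _ l ?_ l [] (fun y hy => hy) (by simp)).symm
  intro a c ha hc
  obtain ⟨m, hm⟩ := Option.isSome_iff_exists.1 (hl a ha)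
  obtain ⟨n, hn⟩ := Option.isSome_iff_exists.1 (hl c hc)
  have hKa : pvSortKey a = toLex ((0 : Int), toLex (-m, ("" : String))) := by
    simp [pvSortKey, pvSortKey3, hm]
  have hKc : pvSortKey c = toLex ((0 : Int), toLex (-n, ("" : String))) := by
    simp [pvSortKey, pvSortKey3, hn]
  have hIa : pvIV a = m := by simp [pvIV, hm]
  have hIc : pvIV c = n := by simp [pvIV, hn]
  rw [hKa, hKc, hIa, hIc, decide_eq_decide]
  constructor
  · intro hlt
    rcases (Prod.Lex.lt_iff).1 hlt with h1 | ⟨_, h2⟩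
    · simp at h1
    · rcases (Prod.Lex.lt_iff).1 h2 with h3 | ⟨_, h4⟩
      · simp only [ofLex_toLex] at h3; omega
      · exact absurd h4 (lt_irrefl _)
  · intro hlt
    refine (Prod.Lex.lt_iff).2 (Or.inr ⟨rfl, ?_⟩)
    refine (Prod.Lex.lt_iff).2 (Or.inl ?_)
    simp only [ofLex_toLex]
    omega

-- group "original": all elements equal, the stable sort is the identity
lemma orig_eq (l : List String) (hl : ∀ k ∈ l, k = "original") :
    PySem.List.sorted l pvSortKey = l := by
  apply PySem.List.sorted_eq_self_of_pairwise
  apply List.pairwise_of_forall_mem_list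
  intro a ha b hb
  rw [hl a ha, hl b hb]

-- group other: pvSortKey orders the remaining labels alphabetically
lemma grp2_eq (l : List String) (hl : ∀ k ∈ l, pvIsNum k = false ∧ k ≠ "original") :
    PySem.List.sorted l pvSortKey = PySem.List.sorted l (fun x => x) := by
  rw [PySem.List.sorted_eq_foldl_insertBy, PySem.List.sorted_eq_foldl_insertBy]
  refine foldl_insertBy_congr _ _ l ?_ l [] (fun y hy => hy) (by simp)
  intro a c ha hc
  obtain ⟨hna, hoa⟩ := hl a ha
  obtain ⟨hnc, hoc⟩ := hl c hc
  have hea : PySem.Int.ofStr? a = none := by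
    cases h : PySem.Int.ofStr? a with
    | none => rfl
    | some n => rw [pvIsNum, h] at hna; simp at hna
  have hec : PySem.Int.ofStr? c = none := by
    cases h : PySem.Int.ofStr? c with
    | none => rfl
    | some n => rw [pvIsNum, h] at hnc; simp at hnc
  have hKa : pvSortKey a = toLex ((2 : Int), toLex (0, a)) := by simp [pvSortKey, pvSortKey3, hea, hoa]
  have hKc : pvSortKey c = toLex ((2 : Int), toLex (0, c)) := by simp [pvSortKey, pvSortKey3, hec, hoc]
  rw [hKa, hKc, decide_eq_decide]
  constructor
  · intro hlt
    rcases (Prod.Lex.lt_iff).1 hlt with h1 | ⟨_, h2⟩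
    · simp at h1
    · rcases (Prod.Lex.lt_iff).1 h2 with h3 | ⟨_, h4⟩
      · simp at h3
      · simpa using h4
  · intro hlt
    exact (Prod.Lex.lt_iff).2 (Or.inr ⟨rfl, (Prod.Lex.lt_iff).2 (Or.inr ⟨rfl, by simpa using hlt⟩)⟩)

-- the cross-group key inequalities needed for the two splits
lemma key_num_lt (a c : String) (ha : pvIsNum a = true) (hc : pvIsNum c = false) :
    pvSortKey a < pvSortKey c := by
  obtain ⟨m, hm⟩ := Option.isSome_iff_exists.1 ha
  have hec : PySem.Int.ofStr? c = none := by
    cases h : PySem.Int.ofStr? c with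
    | none => rfl
    | some n => rw [pvIsNum, h] at hc; simp at hc
  have hKa : pvSortKey a = toLex ((0 : Int), toLex (-m, ("" : String))) := by simp [pvSortKey, pvSortKey3, hm]
  rw [hKa]
  by_cases ho : c = "original"
  · subst ho
    have : pvSortKey "original" = toLex ((1 : Int), toLex (0, ("" : String))) := by
      simp [pvSortKey, pvSortKey3, hec]
    rw [this]
    exact (Prod.Lex.lt_iff).2 (Or.inl (by norm_num))
  · have : pvSortKey c = toLex ((2 : Int), toLex (0, c)) := by simp [pvSortKey, pvSortKey3, hec, ho]
    rw [this]
    exact (Prod.Lex.lt_iff).2 (Or.inl (by norm_num))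

lemma key_orig_lt (a c : String) (ha : a = "original") (hna : pvIsNum a = false)
    (hnc : pvIsNum c = false) (hc : c ≠ "original") :
    pvSortKey a < pvSortKey c := by
  subst ha
  have hea : PySem.Int.ofStr? "original" = none := by
    cases h : PySem.Int.ofStr? "original" with
    | none => rfl
    | some n => rw [pvIsNum, h] at hna; simp at hna
  have hec : PySem.Int.ofStr? c = none := by
    cases h : PySem.Int.ofStr? c with
    | none => rfl
    | some n => rw [pvIsNum, h] at hnc; simp at hnc
  have hKa : pvSortKey "original" = toLex ((1 : Int), toLex (0, ("" : String))) := by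
    simp [pvSortKey, pvSortKey3, hea]
  have hK3 : pvSortKey3 c = (2, 0, c) := by simp [pvSortKey3, hec, hc]
  have hKc : pvSortKey c = toLex ((2 : Int), toLex (0, c)) := by rw [pvSortKey, hK3]
  rw [hKa, hKc]
  exact (Prod.Lex.lt_iff).2 (Or.inl (by norm_num))

-- core equivalence on an arbitrary duplicate-free key list
lemma core_eq (keys : List String) (hnd : keys.Nodup) :
    (let acc := keys.foldl (fun (acc : List (Int × String) × List String) k =>
        match PySem.Int.ofStr? k with
        | some n => (acc.1 ++ [(n, k)], acc.2)
        | none   => (acc.1, acc.2 ++ [k])) ([], [])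
     let numeric := acc.1
     let other := acc.2
     let ordered := (PySem.List.sorted numeric (fun x => x.1) true).map (fun x => x.2)
     if "original" ∈ other then
       let other' := (PySem.List.remove? other "original").getD other
       (ordered ++ ["original"]) ++ PySem.List.sorted other' (fun x => x)
     else
       ordered ++ PySem.List.sorted other (fun x => x))
      = PySem.List.sorted keys pvSortKey := by
  rw [partition_eq keys [] []]
  simp only [List.nil_append]
  set num := keys.filter pvIsNum with hnum
  set rest := keys.filter (fun k => !pvIsNum k) with hrest
  have hrest_all : ∀ k ∈ rest, pvIsNum k = false := by
    intro k hk
    have := List.of_mem_filter hk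
    simpa using this
  have hnum_all : ∀ k ∈ num, pvIsNum k = true := by
    intro k hk
    exact List.of_mem_filter hk
  -- split B's single sort into the three groups
  have hsplit1 : PySem.List.sorted keys pvSortKey
      = PySem.List.sorted num pvSortKey ++ PySem.List.sorted rest pvSortKey := by
    exact sorted_split pvIsNum pvSortKey keys (fun a _ c _ ha hc => key_num_lt a c ha hc)
  have hsplit2 : PySem.List.sorted rest pvSortKey
      = PySem.List.sorted (rest.filter (fun k => k == "original")) pvSortKey
        ++ PySem.List.sorted (rest.filter (fun k => !(k == "original"))) pvSortKey := by
    refine sorted_split (fun k => k == "original") pvSortKey rest ?_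
    intro a ha c hc hpa hpc
    exact key_orig_lt a c (by simpa using hpa) (hrest_all a ha) (hrest_all c hc)
      (by simpa using hpc)
  have horig_all : ∀ k ∈ rest.filter (fun k => k == "original"), k = "original" := by
    intro k hk
    have := List.of_mem_filter hk
    simpa using this
  have hoth_all : ∀ k ∈ rest.filter (fun k => !(k == "original")),
      pvIsNum k = false ∧ k ≠ "original" := by
    intro k hk
    refine ⟨hrest_all k (List.mem_of_mem_filter hk), ?_⟩
    have := List.of_mem_filter hk
    simpa using this
  have hrest_nd : rest.Nodup := hnd.filter _
  rw [hsplit1, hsplit2, grp0_eq num hnum_all, orig_eq _ horig_all, grp2_eq _ hoth_all]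
  by_cases hmem : "original" ∈ rest
  · simp only [hmem, if_true]
    have hcnt : rest.count "original" = 1 := by
      have h1 := (List.nodup_iff_count_le_one.1 hrest_nd) "original"
      have h2 : 0 < rest.count "original" := List.count_pos_iff.2 hmem
      omega
    have hfilt : rest.filter (fun k => k == "original") = ["original"] := by
      rw [List.filter_beq, hcnt]
      rfl
    have hrem : (PySem.List.remove? rest "original").getD rest
        = rest.filter (fun k => !(k == "original")) := by
      rw [PySem.List.remove?_eq_some_erase rest "original" hmem]
      simp only [Option.getD_some]
      rw [hrest_nd.erase_eq_filter]
      rfl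
    rw [hfilt, hrem]
    simp
  · simp only [hmem, if_false]
    have hfilt : rest.filter (fun k => k == "original") = [] := by
      rw [List.filter_eq_nil_iff]
      intro k hk hkeq
      exact hmem ((by simpa using hkeq : k = "original") ▸ hk)
    have hfilt2 : rest.filter (fun k => !(k == "original")) = rest := by
      rw [List.filter_eq_self]
      intro k hk
      simp only [Bool.not_eq_eq_eq_not, Bool.not_true, beq_eq_false_iff_ne, ne_eq]
      intro hkeq
      exact hmem (hkeq ▸ hk)
    rw [hfilt, hfilt2]
    simp

-- ===== VERDICT (by name: the statement is the Claim_ definition above) =====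
theorem ordered_state_names_py_spec : Claim_equal_ordered_state_names_py := by
  intro records _
  unfold Spec_ordered_state_names_py ordered_state_names_py
  rw [alt_eq_sorted]
  exact core_eq _ (PySem.Dict.nodup_keys_ofList records)
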